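-- pv_equiv track=rewrite | github.com/csu-signal/TRACE | mmdemo/features/move/move_classifier.py | remove_non_cga
-- ===== SOURCE A (Python) =====
-- def remove_non_cga(full_data):
--     utt_id = 0
--     while utt_id < (len(full_data)):
--         if full_data[utt_id][-1][1] == [0, 0, 0]:
--             del full_data[utt_id]
--         else:
--             utt_id += 1
--     return full_data
-- ===== SOURCE B (Python) =====
-- def remove_non_cga(full_data):
--     # In-place two-pointer compaction: one forward pass with a write cursor,
--     # then truncate; same list object, same return value as A.
--     w = 0
--     for item in full_data:
--         if item[-1][1] != [0, 0, 0]: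
--             full_data[w] = item
--             w += 1
--     del full_data[w:]
--     return full_data
-- ===== Notes on version B (the rewrite author's own statement) =====
-- stated objective: alternative
-- what changed: Replaces the while-loop that repeatedly del-shifts matching entries with a single forward pass using a write cursor that compacts kept items in place and truncates the tail once.
import Mathlib
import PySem

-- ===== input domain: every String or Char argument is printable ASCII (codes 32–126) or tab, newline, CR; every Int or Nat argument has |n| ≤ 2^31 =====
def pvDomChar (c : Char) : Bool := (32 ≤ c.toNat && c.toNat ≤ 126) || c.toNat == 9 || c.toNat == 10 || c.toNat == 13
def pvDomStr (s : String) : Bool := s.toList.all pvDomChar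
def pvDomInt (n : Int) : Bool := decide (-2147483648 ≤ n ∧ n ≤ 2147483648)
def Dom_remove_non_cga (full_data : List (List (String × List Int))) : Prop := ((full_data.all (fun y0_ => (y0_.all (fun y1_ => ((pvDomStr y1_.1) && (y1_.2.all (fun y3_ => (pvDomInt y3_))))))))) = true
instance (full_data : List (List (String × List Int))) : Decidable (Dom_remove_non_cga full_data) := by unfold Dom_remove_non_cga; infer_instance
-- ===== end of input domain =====

-- ===== PORT A =====
-- B changes: single write-cursor compaction pass instead of repeated del-and-shift (alternative strategy).
-- Both A and B mutate full_data in place in Python and return the same object; the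
-- equivalence proved here is about the return value.
-- last element's second coordinate equals [0,0,0]?  (full_data[utt_id][-1][1] == [0,0,0])
def pvIsNonCga (x : List (String × List Int)) : Bool :=
  ((PySem.List.pyGet? x (-1)).map Prod.snd) == some ([0, 0, 0] : List Int)

-- A: while utt_id < len: if cga-less, del full_data[utt_id] (same index next), else utt_id += 1.
-- Deleting at the scan index and rescanning from it is, on the list value, this recursion.
def remove_non_cga (full_data : List (List (String × List Int))) : List (List (String × List Int)) :=
  match full_data with
  | [] => []
  | x :: xs => if pvIsNonCga x then remove_non_cga xs else x :: remove_non_cga xs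

-- ===== PORT B =====
-- B: one forward fold; a kept item is written at the cursor (appended to the compacted prefix).
def remove_non_cga_alt (full_data : List (List (String × List Int))) : List (List (String × List Int)) :=
  full_data.foldl (fun acc item => if !(pvIsNonCga item) then acc ++ [item] else acc) []

-- ===== PRECONDITION & SPEC =====
-- Pre_ excludes inputs containing an empty inner list: there full_data[utt_id][-1] raises
-- IndexError in A (and in B alike).
def Pre_remove_non_cga (full_data : List (List (String × List Int))) : Prop :=
  ∀ x ∈ full_data, x ≠ []
instance (full_data : List (List (String × List Int))) : Decidable (Pre_remove_non_cga full_data) := by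
  unfold Pre_remove_non_cga; infer_instance
def pvWitness_remove_non_cga : (List (List (String × List Int))) :=
  [[("a", [0, 0, 0])], [("b", [1, 2, 3])]]
def Spec_remove_non_cga (full_data : List (List (String × List Int))) (out : List (List (String × List Int))) : Prop := out = remove_non_cga_alt full_data
instance (full_data : List (List (String × List Int))) (out : List (List (String × List Int))) : Decidable (Spec_remove_non_cga full_data out) := by unfold Spec_remove_non_cga; infer_instance

-- ===== CLAIM (what is proved, stated in full; the proofs are below) =====
def Claim_equal_remove_non_cga : Prop := ∀ (full_data : List (List (String × List Int))), Dom_remove_non_cga full_data → Pre_remove_non_cga full_data → Spec_remove_non_cga full_data (remove_non_cga full_data)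

-- ===== LEMMAS AND PROOFS =====
theorem alt_foldl_acc (l : List (List (String × List Int)))
    (acc : List (List (String × List Int))) :
    l.foldl (fun acc item => if !(pvIsNonCga item) then acc ++ [item] else acc) acc
      = acc ++ l.foldl (fun acc item => if !(pvIsNonCga item) then acc ++ [item] else acc) [] := by
  induction l generalizing acc with
  | nil => simp
  | cons x xs ih =>
    simp only [List.foldl_cons]
    by_cases h : pvIsNonCga x
    · rw [if_neg (by simp [h]), if_neg (by simp [h])]; exact ih acc
    · rw [if_pos (by simp [h]), if_pos (by simp [h]), ih (acc ++ [x]), ih ([] ++ [x])]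
      simp

theorem ports_eq (l : List (List (String × List Int))) :
    remove_non_cga l = remove_non_cga_alt l := by
  unfold remove_non_cga_alt
  induction l with
  | nil => simp [remove_non_cga]
  | cons x xs ih =>
    rw [remove_non_cga]
    by_cases h : pvIsNonCga x
    · rw [if_pos h, List.foldl_cons, if_neg (by simp [h]), ih]
    · rw [if_neg h, List.foldl_cons, if_pos (by simp [h]), alt_foldl_acc, ih]
      simp

-- ===== VERDICT (by name: the statement is the Claim_ definition above) =====
theorem remove_non_cga_spec : Claim_equal_remove_non_cga := by
  intro full_data _ _
  exact ports_eq full_data
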